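-- pv_equiv track=rewrite | github.com/BIH-CEI/ERKER2Phenopackets | src/utils/ParallelizationUtils.py | calc_chunk_size
-- ===== SOURCE A (Python) =====
-- from typing import List
--
-- def calc_chunk_size(num_instance: int, num_chunks: int) -> List[int]:
--     """
--     Calculate chunk sizes for even workload distribution.
--     :param num_instance: Number of instances or rows
--     :type num_instance: int
--     :param num_chunks: Number of chunks
--     :type num_chunks: int
--     :return: List of chunk sizes
--     :rtype: List[int]
--     :raises ValueError: If num_chunks or num_instance is 0
--     """
--     if num_chunks == 0 or num_instance == 0:
--         raise ValueError("num_chunks and num_instance must be greater than 0")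
--
--     chunk_size = num_instance // num_chunks
--     remainder = num_instance % num_chunks
--
--     # remainder is necessarily smaller than num_chunks
--     # therefore, we can just add 1 to the first remainder number of chunks
--     chunk_sizes = [
--         chunk_size + 1 if i < remainder else chunk_size for i in range(num_chunks)
--     ]
--     return chunk_sizes
-- ===== SOURCE B (Python) =====
-- def calc_chunk_size(num_instance: int, num_chunks: int):
--     if num_chunks == 0 or num_instance == 0:
--         raise ValueError("num_chunks and num_instance must be greater than 0")
--
--     # greedy: each chunk takes the ceiling of an even share of the instances
--     # still remaining; the rest is distributed over the remaining chunks
--     sizes = []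
--     remaining, chunks = num_instance, num_chunks
--     while chunks > 0:
--         size = -(-remaining // chunks)
--         sizes.append(size)
--         remaining -= size
--         chunks -= 1
--     return sizes
-- ===== Notes on version B (the rewrite author's own statement) =====
-- stated objective: alternative
-- what changed: Replaces the precomputed (quotient, remainder) per-index comprehension by a greedy sequential loop: each chunk takes the ceiling of an even share of the instances still remaining, and the rest is distributed over the remaining chunks.
import Mathlib
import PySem

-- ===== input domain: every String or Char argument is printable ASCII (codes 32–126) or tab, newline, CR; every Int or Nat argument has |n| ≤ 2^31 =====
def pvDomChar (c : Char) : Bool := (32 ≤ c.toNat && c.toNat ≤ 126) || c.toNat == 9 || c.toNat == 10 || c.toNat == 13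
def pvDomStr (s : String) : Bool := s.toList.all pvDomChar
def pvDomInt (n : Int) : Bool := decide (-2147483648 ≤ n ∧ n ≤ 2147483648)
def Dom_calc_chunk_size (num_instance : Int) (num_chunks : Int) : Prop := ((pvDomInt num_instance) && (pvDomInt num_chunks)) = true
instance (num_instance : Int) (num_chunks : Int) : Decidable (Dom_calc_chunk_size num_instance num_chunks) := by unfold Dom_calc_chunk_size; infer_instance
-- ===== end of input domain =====

-- B replaces A's precomputed (q, r) per-index comprehension by a greedy sequential
-- recursion: each chunk takes the ceiling of an even share of what remains; objective: alternative.

-- ===== PORT A =====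
-- the zero-guard raise is excluded by Pre_; under Pre_ the body computes the comprehension
def calc_chunk_size (num_instance : Int) (num_chunks : Int) : List Int :=
  let chunk_size := PySem.Int.floordiv num_instance num_chunks
  let remainder := PySem.Int.mod num_instance num_chunks
  (PySem.List.pyRange 0 num_chunks 1).map
    (fun i => if i < remainder then chunk_size + 1 else chunk_size)

-- ===== PORT B =====
-- the while loop: sizes accumulator, -(-remaining // chunks) is Python's ceiling division
def pvGoLoop (sizes : List Int) (remaining : Int) (chunks : Int) : List Int :=
  if h : chunks > 0 then
    let size := -(PySem.Int.floordiv (-remaining) chunks)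
    pvGoLoop (sizes ++ [size]) (remaining - size) (chunks - 1)
  else sizes
termination_by chunks.toNat
decreasing_by omega

def calc_chunk_size_alt (num_instance : Int) (num_chunks : Int) : List Int :=
  pvGoLoop [] num_instance num_chunks

-- ===== PRECONDITION & SPEC =====
-- A (and B) raise ValueError when num_chunks == 0 or num_instance == 0
def Pre_calc_chunk_size (num_instance : Int) (num_chunks : Int) : Prop :=
  num_chunks ≠ 0 ∧ num_instance ≠ 0
instance (num_instance : Int) (num_chunks : Int) : Decidable (Pre_calc_chunk_size num_instance num_chunks) := by unfold Pre_calc_chunk_size; infer_instance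

def pvWitness_calc_chunk_size : Int × Int := (10, 3)

def Spec_calc_chunk_size (num_instance : Int) (num_chunks : Int) (out : List Int) : Prop := out = calc_chunk_size_alt num_instance num_chunks
instance (num_instance : Int) (num_chunks : Int) (out : List Int) : Decidable (Spec_calc_chunk_size num_instance num_chunks out) := by unfold Spec_calc_chunk_size; infer_instance

-- ===== CLAIM (what is proved, stated in full; the proofs are below) =====
def Claim_equal_calc_chunk_size : Prop := ∀ (num_instance : Int) (num_chunks : Int), Dom_calc_chunk_size num_instance num_chunks → Pre_calc_chunk_size num_instance num_chunks → Spec_calc_chunk_size num_instance num_chunks (calc_chunk_size num_instance num_chunks)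

-- ===== LEMMAS AND PROOFS =====

-- non-accumulator form of B's loop, used only by the proofs
def pvGo (remaining : Int) (chunks : Int) : List Int :=
  if h : chunks ≤ 0 then []
  else
    let size := -(PySem.Int.floordiv (-remaining) chunks)
    size :: pvGo (remaining - size) (chunks - 1)
termination_by chunks.toNat
decreasing_by omega

theorem pvGoLoop_eq_go (remaining chunks : Int) : ∀ (sizes : List Int),
    pvGoLoop sizes remaining chunks = sizes ++ pvGo remaining chunks := by
  induction remaining, chunks using pvGo.induct with
  | case1 remaining chunks h =>
    intro sizes
    rw [pvGoLoop, dif_neg (by omega), pvGo, dif_pos h, List.append_nil]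
  | case2 remaining chunks h size ih =>
    intro sizes
    rw [pvGoLoop, dif_pos (by omega), pvGo, dif_neg h]
    rw [ih, List.append_assoc]
    rfl

-- Python % with a positive divisor: result in [0, b)
theorem pv_fmod_bounds_pos (a b : Int) (h : 0 < b) : 0 ≤ a.fmod b ∧ a.fmod b < b := by
  rw [Int.fmod_eq_emod]
  have h1 := Int.emod_nonneg a (by omega : b ≠ 0)
  have h2 := Int.emod_lt_of_pos a h
  split_ifs with hc
  · omega
  · exact absurd (Or.inl (le_of_lt h)) hc

-- m = c * (m.fdiv c) + m.fmod c
theorem pv_fdiv_fmod (m c : Int) : c * m.fdiv c + m.fmod c = m := Int.mul_fdiv_add_fmod m c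

-- uniqueness of the floor-division decomposition for a positive divisor
theorem pv_fdivmod_unique (c q r : Int) (hc : 0 < c) (h0 : 0 ≤ r) (h1 : r < c) :
    (c * q + r).fdiv c = q ∧ (c * q + r).fmod c = r := by
  have e := pv_fdiv_fmod (c * q + r) c
  have b := pv_fmod_bounds_pos (c * q + r) c hc
  set q2 := (c * q + r).fdiv c
  set r2 := (c * q + r).fmod c
  have hsum : c * (q2 - q) = r - r2 := by ring_nf; omega
  have hz : q2 - q = 0 := by
    rcases lt_trichotomy (q2 - q) 0 with hlt | heq | hgt
    · exfalso
      have : c * (q2 - q) ≤ c * (-1) := mul_le_mul_of_nonneg_left (by omega) (le_of_lt hc)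
      omega
    · exact heq
    · exfalso
      have : c * 1 ≤ c * (q2 - q) := mul_le_mul_of_nonneg_left (by omega) (le_of_lt hc)
      omega
  constructor
  · omega
  · rw [hz] at hsum; omega

-- ceiling division via the double negation, for positive divisor
theorem pv_ceil_div (m c : Int) (hc : 0 < c) :
    -((-m).fdiv c) = if m.fmod c = 0 then m.fdiv c else m.fdiv c + 1 := by
  have e1 := pv_fdiv_fmod m c
  have e2 := pv_fdiv_fmod (-m) c
  have b1 := pv_fmod_bounds_pos m c hc
  have b2 := pv_fmod_bounds_pos (-m) c hc
  -- from c*q1 + r1 = m and c*q2 + r2 = -m: c*(q1+q2) = -(r1+r2), with 0 ≤ r1+r2 < 2c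
  set q1 := m.fdiv c; set r1 := m.fmod c
  set q2 := (-m).fdiv c; set r2 := (-m).fmod c
  have hsum : c * (q1 + q2) = -(r1 + r2) := by ring_nf; omega
  have hcase : q1 + q2 = 0 ∨ q1 + q2 = -1 := by
    rcases lt_trichotomy (q1 + q2) 0 with hlt | heq | hgt
    · right
      by_contra hne
      have : q1 + q2 ≤ -2 := by omega
      have : c * (q1 + q2) ≤ c * (-2) := by
        exact mul_le_mul_of_nonneg_left this (le_of_lt hc)
      omega
    · left; exact heq
    · exfalso
      have : c * 1 ≤ c * (q1 + q2) := by
        exact mul_le_mul_of_nonneg_left (by omega) (le_of_lt hc)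
      omega
  rcases hcase with hz | hm
  · have : r1 + r2 = 0 := by rw [hz] at hsum; omega
    have hr1 : r1 = 0 := by omega
    rw [if_pos hr1]; omega
  · have : r1 + r2 = c := by rw [hm] at hsum; omega
    have hr1 : r1 ≠ 0 := by
      intro h0; rw [h0] at this; omega
    rw [if_neg hr1]; omega

-- fdiv and fmod step when one ceiling share is removed (positive chunk count)
theorem pv_go_eq_blocks (c : Nat) : ∀ (m : Int), (hc : (c : Int) ≥ 1) →
    pvGo m c = List.replicate (m.fmod c).toNat (m.fdiv c + 1)
      ++ List.replicate ((c : Int) - m.fmod c).toNat (m.fdiv c) := by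
  induction c with
  | zero => intro m hc; omega
  | succ k ih =>
    intro m hc
    have hcpos : (0:Int) < (k+1 : Nat) := by exact_mod_cast Nat.succ_pos k
    rw [pvGo]
    rw [dif_neg (by push_cast; omega)]
    simp only [PySem.Int.floordiv]
    have hb := pv_fmod_bounds_pos m ((k+1:Nat) : Int) hcpos
    have hceil := pv_ceil_div m ((k+1:Nat) : Int) hcpos
    have heq := pv_fdiv_fmod m ((k+1:Nat) : Int)
    set q := m.fdiv ((k+1 : Nat) : Int) with hq
    set r := m.fmod ((k+1 : Nat) : Int) with hr
    by_cases hk : k = 0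
    · -- last chunk: size = whole remainder computation, recursion stops
      subst hk
      rw [pvGo, dif_pos (by omega)]
      have hr0 : r = 0 := by omega
      rw [if_pos hr0] at hceil
      rw [hceil, hr0]
      norm_num
    · -- k ≥ 1: one step, then apply the induction hypothesis at (m - size, k)
      have hk1 : ((k : Nat) : Int) ≥ 1 := by exact_mod_cast Nat.one_le_iff_ne_zero.mpr hk
      by_cases hr0 : r = 0
      · -- even split: size = q; the rest still divides evenly with quotient q
        rw [if_pos hr0] at hceil
        rw [hceil]
        have hstep : m - q = (k : Int) * q := by push_cast at heq ⊢; rw [hr0] at heq; linarith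
        have hq' : (m - q).fdiv (k : Int) = q ∧ (m - q).fmod (k : Int) = 0 := by
          have := pv_fdivmod_unique (k : Int) q 0 (by omega) (by omega) (by omega)
          rw [add_zero] at this
          rw [hstep]
          exact this
        have : ((k+1 : Nat) : Int) - 1 = (k : Nat) := by push_cast; ring
        rw [this, ih (m - q) hk1, hq'.1, hq'.2, hr0]
        simp [List.replicate_succ]
      · -- uneven split: size = q+1; afterwards quotient q, remainder r-1
        simp only [if_neg hr0] at hceil
        rw [hceil]
        have hstep : m - (q+1) = (k : Int) * q + (r - 1) := by push_cast at heq ⊢; linarith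
        have hb' : 0 ≤ r - 1 ∧ r - 1 < (k : Int) := by push_cast at hb; omega
        have hq' : (m - (q+1)).fdiv (k : Int) = q ∧ (m - (q+1)).fmod (k : Int) = r - 1 := by
          rw [hstep]
          exact pv_fdivmod_unique (k : Int) q (r - 1) (by omega) hb'.1 hb'.2
        have : ((k+1 : Nat) : Int) - 1 = (k : Nat) := by push_cast; ring
        rw [this, ih (m - (q+1)) hk1, hq'.1, hq'.2]
        have hrt : r.toNat = (r-1).toNat + 1 := by omega
        rw [hrt]
        simp [List.replicate_succ]
        congr 1
        omega

-- A equals the two-block form (under the zero guards)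
theorem pv_A_eq_blocks (m c : Int) (hc : c ≠ 0) :
    calc_chunk_size m c = List.replicate (m.fmod c).toNat (m.fdiv c + 1)
      ++ List.replicate (c - m.fmod c).toNat (m.fdiv c) := by
  unfold calc_chunk_size
  simp only [PySem.Int.mod, PySem.Int.floordiv]
  set q := m.fdiv c with hq
  set r := m.fmod c with hr
  rcases lt_or_gt_of_ne hc with hneg | hpos
  · have hb2 : c < r ∧ r ≤ 0 := by
      rw [hr, Int.fmod_eq_emod]
      have hne : c ≠ 0 := by omega
      have h1 := Int.emod_nonneg m hne
      have h2 : m % c < -c := by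
        have := Int.emod_lt_of_pos m (b := -c) (by omega)
        rwa [Int.emod_neg] at this
      by_cases hd : c ∣ m
      · have : m % c = 0 := Int.emod_eq_zero_of_dvd hd
        split_ifs with hcnd <;> omega
      · have h0 : m % c ≠ 0 := fun hz => hd (Int.dvd_of_emod_eq_zero hz)
        have hcnd : ¬ (0 ≤ c ∨ c ∣ m) := by
          rintro (h' | h') <;> [omega; exact hd h']
        rw [if_neg hcnd]; omega
    rw [PySem.List.pyRange_one_eq_nil (by omega)]
    have e1 : r.toNat = 0 := by omega
    have e2 : (c - r).toNat = 0 := by omega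
    simp [e1, e2]
  · obtain ⟨hb1, hb2⟩ := pv_fmod_bounds_pos m c hpos
    rw [PySem.List.pyRange_one_append 0 r c hb1 (le_of_lt hb2), List.map_append]
    have hl : (PySem.List.pyRange 0 r 1).map (fun i => if i < r then q + 1 else q)
        = List.replicate r.toNat (q + 1) := by
      rw [List.map_congr_left (g := fun _ => q + 1)
        (fun i hi => by
          have := (PySem.List.mem_pyRange_one).1 hi
          simp [if_pos this.2])]
      rw [List.map_const', PySem.List.length_pyRange_one]
      congr 1; omega
    have hrr : (PySem.List.pyRange r c 1).map (fun i => if i < r then q + 1 else q)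
        = List.replicate (c - r).toNat q := by
      rw [List.map_congr_left (g := fun _ => q)
        (fun i hi => by
          have := (PySem.List.mem_pyRange_one).1 hi
          simp [if_neg (not_lt.2 this.1)])]
      rw [List.map_const', PySem.List.length_pyRange_one]
    rw [hl, hrr]

theorem calc_chunk_size_eq (num_instance num_chunks : Int)
    (hp : Pre_calc_chunk_size num_instance num_chunks) :
    calc_chunk_size num_instance num_chunks = calc_chunk_size_alt num_instance num_chunks := by
  obtain ⟨hnc, _⟩ := hp
  unfold calc_chunk_size_alt
  rw [pvGoLoop_eq_go, List.nil_append]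
  rcases lt_or_gt_of_ne hnc with hneg | hpos
  · rw [pvGo, dif_pos (by omega)]
    rw [pv_A_eq_blocks _ _ hnc]
    have hb2 : num_chunks < num_instance.fmod num_chunks ∧ num_instance.fmod num_chunks ≤ 0 := by
      rw [Int.fmod_eq_emod]
      have hne : num_chunks ≠ 0 := by omega
      have h1 := Int.emod_nonneg num_instance hne
      have h2 : num_instance % num_chunks < -num_chunks := by
        have := Int.emod_lt_of_pos num_instance (b := -num_chunks) (by omega)
        rwa [Int.emod_neg] at this
      by_cases hd : num_chunks ∣ num_instance
      · have : num_instance % num_chunks = 0 := Int.emod_eq_zero_of_dvd hd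
        split_ifs with hcnd <;> omega
      · have h0 : num_instance % num_chunks ≠ 0 := fun hz => hd (Int.dvd_of_emod_eq_zero hz)
        have hcnd : ¬ (0 ≤ num_chunks ∨ num_chunks ∣ num_instance) := by
          rintro (h' | h') <;> [omega; exact hd h']
        rw [if_neg hcnd]; omega
    have e1 : (num_instance.fmod num_chunks).toNat = 0 := by omega
    have e2 : (num_chunks - num_instance.fmod num_chunks).toNat = 0 := by omega
    simp [e1, e2]
  · have hcn : num_chunks = ((num_chunks.toNat : Nat) : Int) := by omega
    rw [pv_A_eq_blocks _ _ hnc, hcn,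
      pv_go_eq_blocks num_chunks.toNat num_instance (by omega)]

-- ===== VERDICT (by name: the statement is the Claim_ definition above) =====
theorem calc_chunk_size_spec : Claim_equal_calc_chunk_size := by
  intro ni nc _ hp
  exact calc_chunk_size_eq ni nc hp
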